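-- pv_equiv track=rewrite | github.com/nzadapredhat/github_actions_poc | report_generator.py | sanitize_model_name
-- ===== SOURCE A (Python) =====
-- def sanitize_model_name(model_name: str) -> str:
--     """
--     Sanitize model name for use in directory/file names.
--
--     Args:
--         model_name: Original model name (may contain special characters)
--
--     Returns:
--         Sanitized model name safe for filesystem use
--     """
--     # Replace problematic characters with underscores
--     replacements = {
--         ':': '_',
--         '/': '_',
--         '\\': '_',
--         '<': '_',
--         '>': '_',
--         '"': '_',
--         '|': '_',
--         '?': '_',
--         '*': '_',
--         ' ': '_'
--     }
--
--     safe_name = model_name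
--     for char, replacement in replacements.items():
--         safe_name = safe_name.replace(char, replacement)
--
--     return safe_name
-- ===== SOURCE B (Python) =====
-- _SPECIALS = frozenset(':/\\<>"|?* ')
--
-- def sanitize_model_name(model_name: str) -> str:
--     """Sanitize model name: single pass, emit '_' for each special character."""
--     return ''.join('_' if ch in _SPECIALS else ch for ch in model_name)
-- ===== Notes on version B (the rewrite author's own statement) =====
-- stated objective: simpler
-- what changed: Replaces A's ten sequential full-string str.replace scans with one character-by-character pass that emits an underscore for each member of a frozenset of the ten special characters, joined once.
import Mathlib
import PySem

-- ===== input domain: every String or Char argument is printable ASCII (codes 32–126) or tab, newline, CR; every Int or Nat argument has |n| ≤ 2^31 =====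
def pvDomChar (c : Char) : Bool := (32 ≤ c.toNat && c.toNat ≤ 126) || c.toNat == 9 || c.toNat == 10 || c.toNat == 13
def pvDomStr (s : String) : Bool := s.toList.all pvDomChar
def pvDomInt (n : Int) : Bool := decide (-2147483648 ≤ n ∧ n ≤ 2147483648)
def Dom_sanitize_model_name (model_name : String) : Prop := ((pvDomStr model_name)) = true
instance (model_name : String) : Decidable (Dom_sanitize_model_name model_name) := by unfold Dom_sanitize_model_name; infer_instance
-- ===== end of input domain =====

-- B replaces A's ten sequential full-string str.replace scans by one character-by-character
-- pass over the string (objective: simpler).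

-- ===== PORT A =====
-- the 'replacements' dict of A, as an association list in insertion order
def pvReplacements : List (String × String) :=
  [(":", "_"), ("/", "_"), ("\\", "_"), ("<", "_"), (">", "_"),
   ("\"", "_"), ("|", "_"), ("?", "_"), ("*", "_"), (" ", "_")]

def sanitize_model_name (model_name : String) : String :=
  pvReplacements.foldl (fun safe_name p => PySem.Str.replace safe_name p.1 p.2) model_name

-- ===== PORT B =====
-- the frozenset of special characters from Source B
def pvSpecials : List Char := [':', '/', '\\', '<', '>', '"', '|', '?', '*', ' ']

def sanitize_model_name_alt (model_name : String) : String :=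
  String.ofList (model_name.toList.map (fun ch => if pvSpecials.contains ch then '_' else ch))

-- ===== PRECONDITION & SPEC =====
def Spec_sanitize_model_name (model_name : String) (out : String) : Prop := out = sanitize_model_name_alt model_name
instance (model_name : String) (out : String) : Decidable (Spec_sanitize_model_name model_name out) := by unfold Spec_sanitize_model_name; infer_instance

-- ===== CLAIM (what is proved, stated in full; the proofs are below) =====
def Claim_equal_sanitize_model_name : Prop := ∀ (model_name : String), Dom_sanitize_model_name model_name → Spec_sanitize_model_name model_name (sanitize_model_name model_name)

-- ===== LEMMAS AND PROOFS =====

-- str.replace with a one-character pattern and replacement is a character map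
theorem pv_go_single (c d : Char) :
    ∀ (s acc : List Char) (fuel : Nat), s.length ≤ fuel →
      PySem.Chars.replace.go [c] [d] fuel s acc
        = acc.reverse ++ s.map (fun x => if x = c then d else x) := by
  intro s
  induction s with
  | nil =>
    intro acc fuel _
    cases fuel <;> simp [PySem.Chars.replace.go]
  | cons a t ih =>
    intro acc fuel hf
    cases fuel with
    | zero => simp at hf
    | succ fuel =>
      by_cases hac : a = c
      · subst hac
        have hpre : ([a] : List Char).isPrefixOf (a :: t) = true := by
          simp [List.isPrefixOf]
        simp only [PySem.Chars.replace.go, hpre, if_pos, List.length_singleton,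
          List.drop_succ_cons, List.drop_zero, List.reverse_singleton, List.singleton_append]
        rw [ih (d :: acc) fuel (by simpa using Nat.succ_le_succ_iff.mp hf)]
        simp
      · have hpre : ([c] : List Char).isPrefixOf (a :: t) = false := by
          simp [List.isPrefixOf, Ne.symm hac]
        simp only [PySem.Chars.replace.go, hpre]
        rw [ih (a :: acc) fuel (by simpa using Nat.succ_le_succ_iff.mp hf)]
        simp [hac]

theorem pv_replace_single (s : List Char) (c d : Char) :
    PySem.Chars.replace s [c] [d] = s.map (fun x => if x = c then d else x) := by
  rw [PySem.Chars.replace]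
  simpa using pv_go_single c d s [] s.length le_rfl

-- composing the per-character maps over a list of pattern chars, none of which is '_',
-- is the single membership-test map of B
theorem pv_fold_maps (cs : List Char) (h : '_' ∉ cs) :
    ∀ (s : List Char),
      cs.foldl (fun t c => t.map (fun x => if x = c then '_' else x)) s
        = s.map (fun x => if cs.contains x then '_' else x) := by
  induction cs with
  | nil => intro s; simp
  | cons c cs ih =>
    intro s
    have h' : '_' ∉ cs := fun hm => h (List.mem_cons_of_mem _ hm)
    have hc : c ≠ '_' := fun hc => h (hc ▸ List.mem_cons_self)
    simp only [List.foldl_cons]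
    rw [ih h', List.map_map]
    apply List.map_congr_left
    intro x _
    by_cases hx : x = c
    · subst hx
      simp
    · simp [Function.comp, hx]

-- ===== VERDICT (by name: the statement is the Claim_ definition above) =====
theorem sanitize_model_name_spec : Claim_equal_sanitize_model_name := by
  intro m _
  unfold Spec_sanitize_model_name sanitize_model_name sanitize_model_name_alt
  have hfold :
      pvReplacements.foldl (fun safe_name p => PySem.Str.replace safe_name p.1 p.2) m
        = String.ofList
            (pvSpecials.foldl (fun t c => t.map (fun x => if x = c then '_' else x)) m.toList) := by
    simp only [pvReplacements, pvSpecials, List.foldl_cons, List.foldl_nil,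
      PySem.Str.replace]
    simp [pv_replace_single]
  rw [hfold, pv_fold_maps pvSpecials (by decide)]
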